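-- pv_equiv track=rewrite | github.com/dddwsd/algorithm | codility/2016/1_rectangle_builder_greater_area.py | solution
-- ===== SOURCE A (Python) =====
-- from collections import defaultdict
-- from itertools import combinations
-- from collections import defaultdict
-- from collections import defaultdict
--
-- def solution(A, X):
--     # write your code in Python 3.6
--     answer = 0
--     length_dic = defaultdict(int)
--     combi_list = []
--     for fence in A:
--         length_dic[fence] += 1
--         if length_dic[fence] == 2:
--             combi_list.append(fence)
--         elif length_dic[fence] == 4:
--             if fence ** 2 >= X:
--                 answer += 1
--
--     for items in list(combinations(combi_list, 2)):
--         w, h = items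
--         if w*h >= X:
--             answer += 1
--     return answer
-- ===== SOURCE B (Python) =====
-- from collections import Counter
--
--
-- def _bisect_left(a, x):
--     # bisect.bisect_left (hand-rolled: A's module does not import bisect)
--     lo, hi = 0, len(a)
--     while lo < hi:
--         mid = (lo + hi) // 2
--         if a[mid] < x:
--             lo = mid + 1
--         else:
--             hi = mid
--     return lo
--
--
-- def _bisect_right(a, x):
--     # bisect.bisect_right
--     lo, hi = 0, len(a)
--     while lo < hi:
--         mid = (lo + hi) // 2
--         if x < a[mid]:
--             hi = mid
--         else:
--             lo = mid + 1
--     return lo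
--
--
-- def solution(A, X):
--     # Sort the distinct repeated lengths once; for each one, count its valid
--     # partners in the sorted suffix with a binary search on the exact integer
--     # threshold (ceil(X/w) for w>0, floor(X/w) for w<0), instead of testing
--     # every pair.  O(n + m log m) where m = number of repeated lengths.
--     cnt = Counter(A)
--     ans = sum(1 for k, c in cnt.items() if c >= 4 and k * k >= X)
--     rep = sorted(k for k, c in cnt.items() if c >= 2)
--     m = len(rep)
--     for i in range(m):
--         w = rep[i]
--         if w > 0:
--             t = -((-X) // w)                      # ceil(X / w): w*h >= X  <=>  h >= t
--             ans += m - max(_bisect_left(rep, t), i + 1)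
--         elif w < 0:
--             t = X // w                            # floor(X / w): w*h >= X  <=>  h <= t
--             ans += max(_bisect_right(rep, t) - (i + 1), 0)
--         elif X <= 0:
--             ans += m - (i + 1)
--     return ans
-- ===== Notes on version B (the rewrite author's own statement) =====
-- stated objective: faster
-- what changed: B sorts the distinct repeated lengths once and, for each length, counts its partners in the sorted suffix by binary-searching the exact integer threshold (ceil(X/w) for positive w, floor(X/w) for negative w, a sign test for w=0), replacing A's enumeration of all combinations of repeated lengths.
import Mathlib
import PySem

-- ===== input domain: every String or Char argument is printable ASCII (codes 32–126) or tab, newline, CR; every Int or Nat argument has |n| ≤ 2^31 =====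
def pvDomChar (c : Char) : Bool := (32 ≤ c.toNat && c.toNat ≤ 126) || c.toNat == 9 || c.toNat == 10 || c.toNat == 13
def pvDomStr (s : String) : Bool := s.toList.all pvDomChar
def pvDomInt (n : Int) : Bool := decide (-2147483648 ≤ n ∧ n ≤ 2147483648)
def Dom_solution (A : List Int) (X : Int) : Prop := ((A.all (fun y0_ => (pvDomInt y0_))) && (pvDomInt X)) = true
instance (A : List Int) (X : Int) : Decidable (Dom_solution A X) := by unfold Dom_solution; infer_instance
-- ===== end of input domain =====

-- B sorts the distinct repeated lengths once and counts each length's partners in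
-- the sorted suffix by binary search on an exact integer threshold, instead of
-- A's enumeration of all combinations of repeated lengths.

-- ===== PORT A =====
-- itertools.combinations(l, 2): the pairs (l[i], l[j]) with i < j
def pvComb2 (l : List Int) : List (Int × Int) :=
  match l with
  | [] => []
  | w :: t => t.map (fun h => (w, h)) ++ pvComb2 t

-- body of A's first loop over the state (answer, length_dic, combi_list)
def pvStep (X : Int) (s : Int × PySem.Dict Int Int × List Int) (fence : Int) :
    Int × PySem.Dict Int Int × List Int :=
  let d := s.2.1.modify fence 0 (· + 1)       -- length_dic[fence] += 1 (defaultdict(int))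
  let v := d.getD fence 0
  if v = 2 then (s.1, d, s.2.2 ++ [fence])
  else if v = 4 then (s.1 + (if X ≤ fence ^ 2 then 1 else 0), d, s.2.2)
  else (s.1, d, s.2.2)

def solution (A : List Int) (X : Int) : Int :=
  let st := A.foldl (pvStep X) (0, PySem.Dict.empty, [])
  -- for items in list(combinations(combi_list, 2)): ...
  (pvComb2 st.2.2).foldl (fun a p => if X ≤ p.1 * p.2 then a + 1 else a) st.1

-- ===== PORT B =====
-- Source B's hand-rolled _bisect_left/_bisect_right are CPython's bisect_left/bisect_right
-- loop for loop; ported as the prelude's own PySem.List.bisectLeft / bisectRight.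
def solution_alt (A : List Int) (X : Int) : Int :=
  let cnt := PySem.Dict.counter A
  let ans0 : Int :=
    ((cnt.items.filter (fun q => decide (4 ≤ q.2) && decide (X ≤ q.1 * q.1))).length : Int)
  let rep := PySem.List.sorted ((cnt.items.filter (fun q => decide (2 ≤ q.2))).map Prod.fst)
    (fun k => k)
  let m := rep.length
  (List.range m).foldl (fun ans i =>
    let w := rep.getD i 0
    if 0 < w then
      let t := -(PySem.Int.floordiv (-X) w)       -- ceil(X / w)
      ans + ((m : Int) - max ((PySem.List.bisectLeft rep t : Nat) : Int) ((i : Int) + 1))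
    else if w < 0 then
      let t := PySem.Int.floordiv X w             -- floor(X / w)
      ans + max (((PySem.List.bisectRight rep t : Nat) : Int) - ((i : Int) + 1)) 0
    else if X ≤ 0 then ans + ((m : Int) - ((i : Int) + 1))
    else ans) ans0

-- ===== PRECONDITION & SPEC =====
def Spec_solution (A : List Int) (X : Int) (out : Int) : Prop := out = solution_alt A X
instance (A : List Int) (X : Int) (out : Int) : Decidable (Spec_solution A X out) := by unfold Spec_solution; infer_instance

-- ===== CLAIM (what is proved, stated in full; the proofs are below) =====
def Claim_equal_solution : Prop := ∀ (A : List Int) (X : Int), Dom_solution A X → Spec_solution A X (solution A X)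

-- ===== LEMMAS AND PROOFS =====

-- pair count over combinations, ordered count, diagonal count
def pvPc (X : Int) (l : List Int) : Int :=
  ((pvComb2 l).filter (fun q => decide (X ≤ q.1 * q.2))).length
def pvOrd (X : Int) (l : List Int) : Int :=
  (l.map (fun w => ((l.filter (fun h => decide (X ≤ w * h))).length : Int))).sum
def pvDiag (X : Int) (l : List Int) : Int :=
  ((l.filter (fun w => decide (X ≤ w * w))).length : Int)
-- the repeated lengths as B computes them (before sorting), and the squares count
def pvRep (A : List Int) : List Int :=
  (PySem.Set.ofList A).filter (fun k => decide (2 ≤ (A.count k : Int)))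
def pvSq (X : Int) (A : List Int) : Int :=
  (((PySem.Set.ofList A).filter
    (fun k => decide (4 ≤ (A.count k : Int)) && decide (X ≤ k * k))).length : Int)

lemma pvOfList_snoc (h : List Int) (x : Int) :
    PySem.Set.ofList (h ++ [x]) = (PySem.Set.ofList h).add x := by
  simp [PySem.Set.ofList_eq_foldl, List.foldl_append]

lemma pvFilterLen_update (l : List Int) (hl : l.Nodup) (x : Int) (hx : x ∈ l)
    (p q : Int → Bool) (hag : ∀ y ∈ l, y ≠ x → p y = q y) (hpx : p x = false) :
    ((l.filter q).length : Int) = ((l.filter p).length : Int) + (if q x then 1 else 0) := by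
  obtain ⟨l1, l2, rfl⟩ := List.append_of_mem hx
  rw [List.nodup_append] at hl
  obtain ⟨hn1, hn2, hdisj⟩ := hl
  have hx1 : x ∉ l1 := fun hm => hdisj x hm x (List.mem_cons_self) rfl
  have hx2 : x ∉ l2 := (List.nodup_cons.mp hn2).1
  have e1 : l1.filter q = l1.filter p :=
    (List.filter_congr (fun y hy => hag y (by simp [hy]) (fun he => hx1 (he ▸ hy)))).symm
  have e2 : l2.filter q = l2.filter p :=
    (List.filter_congr (fun y hy => hag y (by simp [hy]) (fun he => hx2 (he ▸ hy)))).symm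
  by_cases hq : q x <;>
    simp [List.filter_append, List.filter_cons, hpx, hq, e1, e2] <;> push_cast <;> ring

lemma pvLoop1_spec (X : Int) (A : List Int) :
    (A.foldl (pvStep X) (0, PySem.Dict.empty, [])).2.1 = PySem.Dict.counter A ∧
    (A.foldl (pvStep X) (0, PySem.Dict.empty, [])).2.2.Nodup ∧
    (∀ k, k ∈ (A.foldl (pvStep X) (0, PySem.Dict.empty, [])).2.2 ↔ 2 ≤ (A.count k : Int)) ∧
    (A.foldl (pvStep X) (0, PySem.Dict.empty, [])).1 = pvSq X A := by
  induction A using List.reverseRecOn with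
  | nil =>
    refine ⟨rfl, by simp, by simp, by simp [pvSq]⟩
  | append_singleton h x ih =>
    obtain ⟨ihd, ihnd, ihmem, ihans⟩ := ih
    have hfold : (h ++ [x]).foldl (pvStep X) (0, PySem.Dict.empty, [])
        = pvStep X (h.foldl (pvStep X) (0, PySem.Dict.empty, [])) x := by
      rw [List.foldl_append]; rfl
    set st := h.foldl (pvStep X) (0, PySem.Dict.empty, []) with hst
    have hdict : st.2.1.modify x 0 (· + 1) = PySem.Dict.counter (h ++ [x]) := by
      rw [ihd, PySem.Dict.counter_append_singleton]
    have hcnt_ne : ∀ k : Int, k ≠ x → (h ++ [x]).count k = h.count k := by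
      intro k hk; simp [List.count_append, List.count_singleton', hk, Ne.symm hk]
    have hcnt_x : (h ++ [x]).count x = h.count x + 1 := by
      simp [List.count_append]
    have hv : (st.2.1.modify x 0 (· + 1)).getD x 0 = (h.count x : Int) + 1 := by
      rw [hdict, PySem.Dict.getD_counter, hcnt_x]
      push_cast
      ring
    have hstep : pvStep X st x =
        if (h.count x : Int) + 1 = 2 then
          (st.1, st.2.1.modify x 0 (· + 1), st.2.2 ++ [x])
        else if (h.count x : Int) + 1 = 4 then
          (st.1 + (if X ≤ x ^ 2 then 1 else 0), st.2.1.modify x 0 (· + 1), st.2.2)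
        else (st.1, st.2.1.modify x 0 (· + 1), st.2.2) := by
      simp only [pvStep, hv]
    rw [hfold, hstep]
    by_cases c1 : h.count x = 1
    · -- second occurrence: append to combi_list
      rw [if_pos (by omega)]
      have hxnot : x ∉ st.2.2 := by
        rw [ihmem x, c1]; norm_num
      have hxin : x ∈ h := List.count_pos_iff.mp (by omega)
      refine ⟨hdict, ?_, ?_, ?_⟩
      · rw [List.nodup_append]
        exact ⟨ihnd, List.nodup_singleton x,
          fun a ha b hb => by
            simp only [List.mem_singleton] at hb
            subst hb
            exact fun he => hxnot (he ▸ ha)⟩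
      · intro k
        by_cases hk : k = x
        · subst hk; simp [hcnt_x, c1]
        · simp [List.mem_append, hk, ihmem k, hcnt_ne k hk]
      · show st.1 = pvSq X (h ++ [x])
        rw [ihans]
        unfold pvSq
        rw [pvOfList_snoc, PySem.Set.add_of_mem (by rw [PySem.Set.mem_ofList]; exact hxin)]
        have : ∀ y ∈ PySem.Set.ofList h,
            (decide (4 ≤ (h.count y : Int)) && decide (X ≤ y * y))
              = (decide (4 ≤ ((h ++ [x]).count y : Int)) && decide (X ≤ y * y)) := by
          intro y _
          beta_reduce
          by_cases hy : y = x
          · subst hy; rw [hcnt_x, c1]; norm_num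
          · rw [hcnt_ne y hy]
        rw [List.filter_congr this]
    · rw [if_neg (by omega)]
      by_cases c3 : h.count x = 3
      · -- fourth occurrence: count a square
        rw [if_pos (by omega)]
        have hxin : x ∈ h := List.count_pos_iff.mp (by omega)
        refine ⟨hdict, ihnd, ?_, ?_⟩
        · intro k
          by_cases hk : k = x
          · subst hk; simp [hcnt_x, c3, ihmem k]
          · simp [ihmem k, hcnt_ne k hk]
        · show st.1 + (if X ≤ x ^ 2 then 1 else 0) = pvSq X (h ++ [x])
          rw [ihans]
          unfold pvSq
          rw [pvOfList_snoc, PySem.Set.add_of_mem (by rw [PySem.Set.mem_ofList]; exact hxin)]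
          rw [pvFilterLen_update (PySem.Set.ofList h) (PySem.Set.nodup_ofList h) x
            (by rw [PySem.Set.mem_ofList]; exact hxin)
            (fun k => decide (4 ≤ (h.count k : Int)) && decide (X ≤ k * k))
            (fun k => decide (4 ≤ ((h ++ [x]).count k : Int)) && decide (X ≤ k * k))
            (fun y _ hy => by beta_reduce; rw [hcnt_ne y hy])
            (by beta_reduce; rw [c3]; norm_num)]
          have : (if (decide (4 ≤ (((h ++ [x]).count x : Nat) : Int)) && decide (X ≤ x * x)) = true
              then (1 : Int) else 0) = (if X ≤ x ^ 2 then 1 else 0) := by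
            rw [hcnt_x, c3]
            by_cases hxx : X ≤ x * x <;> simp [hxx, pow_two]
          rw [this]
      · -- other occurrence counts: state unchanged
        rw [if_neg (by omega)]
        refine ⟨hdict, ihnd, ?_, ?_⟩
        · intro k
          by_cases hk : k = x
          · subst hk; rw [ihmem k, hcnt_x]
            constructor <;> intro <;> push_cast at * <;> omega
          · simp [ihmem k, hcnt_ne k hk]
        · show st.1 = pvSq X (h ++ [x])
          rw [ihans]
          unfold pvSq
          by_cases hxin : x ∈ h
          · rw [pvOfList_snoc, PySem.Set.add_of_mem (by rw [PySem.Set.mem_ofList]; exact hxin)]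
            have : ∀ y ∈ PySem.Set.ofList h,
                (decide (4 ≤ (h.count y : Int)) && decide (X ≤ y * y))
                  = (decide (4 ≤ ((h ++ [x]).count y : Int)) && decide (X ≤ y * y)) := by
              intro y _
              beta_reduce
              by_cases hy : y = x
              · subst hy; rw [hcnt_x]
                have : (4 ≤ ((h.count y : Nat) : Int)) ↔ (4 ≤ (((h.count y + 1 : Nat)) : Int)) := by
                  push_cast; omega
                rw [show decide (4 ≤ ((h.count y : Nat) : Int))
                    = decide (4 ≤ (((h.count y + 1 : Nat)) : Int)) from decide_eq_decide.mpr this]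
              · rw [hcnt_ne y hy]
            rw [List.filter_congr this]
          · have c0 : h.count x = 0 := List.count_eq_zero.mpr hxin
            rw [pvOfList_snoc, PySem.Set.add_of_not_mem (by rw [PySem.Set.mem_ofList]; exact hxin)]
            rw [List.filter_append]
            have hx1 : List.filter (fun k => decide (4 ≤ (((h ++ [x]).count k : Nat) : Int))
                && decide (X ≤ k * k)) [x] = [] := by
              simp [List.filter, hcnt_x, c0]
            rw [hx1, List.append_nil]
            have : ∀ y ∈ PySem.Set.ofList h,
                (decide (4 ≤ (h.count y : Int)) && decide (X ≤ y * y))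
                  = (decide (4 ≤ ((h ++ [x]).count y : Int)) && decide (X ≤ y * y)) := by
              intro y hy
              beta_reduce
              have hy' : y ≠ x := by
                rw [PySem.Set.mem_ofList] at hy
                exact fun he => hxin (he ▸ hy)
              rw [hcnt_ne y hy']
            rw [List.filter_congr this]

lemma pvFoldCount (l : List (Int × Int)) (X a : Int) :
    l.foldl (fun a p => if X ≤ p.1 * p.2 then a + 1 else a) a
      = a + ((l.filter (fun q => decide (X ≤ q.1 * q.2))).length : Int) := by
  induction l generalizing a with
  | nil => simp
  | cons p t ih =>
    by_cases h : X ≤ p.1 * p.2 <;>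
      simp [List.filter_cons, h, ih] <;> push_cast <;> ring

lemma pvSumAdd (t : List Int) (f g : Int → Int) :
    (t.map (fun w => f w + g w)).sum = (t.map f).sum + (t.map g).sum := by
  induction t with
  | nil => simp
  | cons a t ih => simp [ih]; ring

lemma pvIndicatorSum (l : List Int) (p : Int → Prop) [DecidablePred p] :
    (l.map (fun w => if p w then (1 : Int) else 0)).sum
      = ((l.filter (fun w => decide (p w))).length : Int) := by
  induction l with
  | nil => simp
  | cons a t ih =>
    by_cases h : p a <;> simp [List.filter_cons, h, ih] <;> push_cast <;> ring

lemma pvTwoMul (X : Int) (l : List Int) :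
    2 * pvPc X l = pvOrd X l - pvDiag X l := by
  induction l with
  | nil => simp [pvPc, pvOrd, pvDiag, pvComb2]
  | cons a t ih =>
    have hpc : pvPc X (a :: t)
        = ((t.filter (fun h => decide (X ≤ a * h))).length : Int) + pvPc X t := by
      simp [pvPc, pvComb2, List.filter_append, List.filter_map, Function.comp_def]
    have hdiag : pvDiag X (a :: t)
        = (if X ≤ a * a then 1 else 0) + pvDiag X t := by
      by_cases h : X ≤ a * a <;> simp [pvDiag, List.filter_cons, h] <;> push_cast <;> ring
    have hF : ∀ w : Int, (((a :: t).filter (fun h => decide (X ≤ w * h))).length : Int)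
        = (if X ≤ w * a then 1 else 0)
          + ((t.filter (fun h => decide (X ≤ w * h))).length : Int) := by
      intro w
      by_cases h : X ≤ w * a <;> simp [List.filter_cons, h] <;> push_cast <;> ring
    have hord : pvOrd X (a :: t)
        = (if X ≤ a * a then 1 else 0)
          + 2 * ((t.filter (fun h => decide (X ≤ a * h))).length : Int) + pvOrd X t := by
      unfold pvOrd
      rw [List.map_cons, List.sum_cons, hF a]
      rw [List.map_congr_left (fun w _ => hF w)]
      rw [pvSumAdd t (fun w => if X ≤ w * a then 1 else 0)
            (fun w => ((t.filter (fun h => decide (X ≤ w * h))).length : Int))]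
      have hind : (t.map (fun w => if X ≤ w * a then (1 : Int) else 0)).sum
          = ((t.filter (fun h => decide (X ≤ a * h))).length : Int) := by
        rw [pvIndicatorSum t (fun w => X ≤ w * a)]
        have : ∀ y ∈ t, (decide (X ≤ y * a)) = (decide (X ≤ a * y)) := by
          intro y _; rw [mul_comm y a]
        rw [List.filter_congr this]
      rw [hind]
      ring
    rw [hpc, hdiag, hord]
    omega

lemma pvOrd_perm (X : Int) {l l' : List Int} (hp : l.Perm l') : pvOrd X l = pvOrd X l' := by
  unfold pvOrd
  rw [List.map_congr_left
    (fun w _ => by rw [(hp.filter (fun h => decide (X ≤ w * h))).length_eq])]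
  exact (hp.map _).sum_eq

lemma pvDiag_perm (X : Int) {l l' : List Int} (hp : l.Perm l') : pvDiag X l = pvDiag X l' := by
  unfold pvDiag
  rw [(hp.filter _).length_eq]

lemma pvPc_perm (X : Int) {l l' : List Int} (hp : l.Perm l') : pvPc X l = pvPc X l' := by
  have h1 := pvTwoMul X l
  have h2 := pvTwoMul X l'
  have h3 := pvOrd_perm X hp
  have h4 := pvDiag_perm X hp
  omega

-- ===== B-side lemmas =====

-- threshold for positive w: w*h ≥ X  ↔  ceil(X/w) ≤ h
lemma pvCeil_iff (X w h : Int) (hw : 0 < w) :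
    (X ≤ w * h) ↔ (-(PySem.Int.floordiv (-X) w) ≤ h) := by
  obtain ⟨h1, h2⟩ := (PySem.Int.neg_floordiv_neg_eq_iff_of_pos (a := X)
      (q := -(PySem.Int.floordiv (-X) w)) hw).mp rfl
  constructor
  · intro hx
    have hlt : (-(PySem.Int.floordiv (-X) w) - 1) * w < h * w := by nlinarith
    have := lt_of_mul_lt_mul_right hlt hw.le
    omega
  · intro hh
    calc X ≤ -(PySem.Int.floordiv (-X) w) * w := h2
    _ ≤ h * w := mul_le_mul_of_nonneg_right hh hw.le
    _ = w * h := mul_comm h w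

-- threshold for negative w: w*h ≥ X  ↔  h ≤ floor(X/w)
lemma pvFloor_iff (X w h : Int) (hw : w < 0) :
    (X ≤ w * h) ↔ (h ≤ PySem.Int.floordiv X w) := by
  have heq := PySem.Int.floordiv_mul_add_mod X w
  obtain ⟨hr1, hr2⟩ := PySem.Int.mod_neg_bounds X hw
  set q := PySem.Int.floordiv X w
  set r := PySem.Int.mod X w
  constructor
  · intro hx
    by_contra hc
    have hq1 : q + 1 ≤ h := by omega
    have : w * h ≤ w * (q + 1) := mul_le_mul_of_nonpos_left hq1 hw.le
    nlinarith
  · intro hh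
    have : w * q ≤ w * h := mul_le_mul_of_nonpos_left hh hw.le
    nlinarith

-- counting elements ≥ t in a sorted suffix via bisect_left
lemma pvCountGe (s : List Int) (t : Int) (k : Nat) (hs : s.Pairwise (· ≤ ·))
    (hk : k ≤ s.length) :
    (((s.drop k).filter (fun h => decide (t ≤ h))).length : Int)
      = (s.length : Int) - max ((PySem.List.bisectLeft s t : Nat) : Int) ((k : Nat) : Int) := by
  obtain ⟨hble, hbelow, habove⟩ := PySem.List.bisectLeft_spec s t hs
  set b := PySem.List.bisectLeft s t with hb
  have hlen_take : (s.take b).length = b := by simp [Nat.min_eq_left hble]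
  have hsplit : s = s.take b ++ s.drop b := (List.take_append_drop b s).symm
  have hdrop : s.drop k = (s.take b).drop k ++ (s.drop b).drop (k - b) := by
    conv_lhs => rw [hsplit]
    rw [List.drop_append, hlen_take]
  have hfail : ((s.take b).drop k).filter (fun h => decide (t ≤ h)) = [] := by
    rw [List.filter_eq_nil_iff]
    intro y hy
    have hy' : y ∈ s.take b := List.mem_of_mem_drop hy
    obtain ⟨j, hj, rfl⟩ := List.mem_iff_getElem.mp hy'
    rw [List.getElem_take]
    have hjb : j < b := by simpa [hlen_take] using hj
    have := hbelow j (by omega) hjb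
    simpa using by omega
  have hpass : ((s.drop b).drop (k - b)).filter (fun h => decide (t ≤ h))
      = (s.drop b).drop (k - b) := by
    rw [List.filter_eq_self]
    intro y hy
    have hy' : y ∈ s.drop b := List.mem_of_mem_drop hy
    obtain ⟨j, hj, rfl⟩ := List.mem_iff_getElem.mp hy'
    rw [List.getElem_drop]
    have hj' : j < s.length - b := by simpa using hj
    have := habove (b + j) (by omega) (by omega)
    simpa using this
  rw [hdrop, List.filter_append, hfail, hpass]
  simp only [List.nil_append, List.length_drop]
  omega

-- counting elements ≤ t in a sorted suffix via bisect_right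
lemma pvCountLe (s : List Int) (t : Int) (k : Nat) (hs : s.Pairwise (· ≤ ·))
    (hk : k ≤ s.length) :
    (((s.drop k).filter (fun h => decide (h ≤ t))).length : Int)
      = max (((PySem.List.bisectRight s t : Nat) : Int) - ((k : Nat) : Int)) 0 := by
  obtain ⟨hble, hbelow, habove⟩ := PySem.List.bisectRight_spec s t hs
  set b := PySem.List.bisectRight s t with hb
  have hlen_take : (s.take b).length = b := by simp [Nat.min_eq_left hble]
  have hsplit : s = s.take b ++ s.drop b := (List.take_append_drop b s).symm
  have hdrop : s.drop k = (s.take b).drop k ++ (s.drop b).drop (k - b) := by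
    conv_lhs => rw [hsplit]
    rw [List.drop_append, hlen_take]
  have hpass : ((s.take b).drop k).filter (fun h => decide (h ≤ t)) = (s.take b).drop k := by
    rw [List.filter_eq_self]
    intro y hy
    have hy' : y ∈ s.take b := List.mem_of_mem_drop hy
    obtain ⟨j, hj, rfl⟩ := List.mem_iff_getElem.mp hy'
    rw [List.getElem_take]
    have hjb : j < b := by simpa [hlen_take] using hj
    have := hbelow j (by omega) hjb
    simpa using this
  have hfail : ((s.drop b).drop (k - b)).filter (fun h => decide (h ≤ t)) = [] := by
    rw [List.filter_eq_nil_iff]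
    intro y hy
    have hy' : y ∈ s.drop b := List.mem_of_mem_drop hy
    obtain ⟨j, hj, rfl⟩ := List.mem_iff_getElem.mp hy'
    rw [List.getElem_drop]
    have hj' : j < s.length - b := by simpa using hj
    have := habove (b + j) (by omega) (by omega)
    simpa using by omega
  rw [hdrop, List.filter_append, hpass, hfail]
  simp only [List.append_nil, List.length_drop, List.length_take]
  omega

-- per-index contribution of B's main loop
def pvG (X : Int) (s : List Int) (i : Nat) : Int :=
  let w := s.getD i 0
  if 0 < w then
    (s.length : Int) - max ((PySem.List.bisectLeft s (-(PySem.Int.floordiv (-X) w)) : Nat) : Int)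
      ((i : Int) + 1)
  else if w < 0 then
    max (((PySem.List.bisectRight s (PySem.Int.floordiv X w) : Nat) : Int) - ((i : Int) + 1)) 0
  else if X ≤ 0 then (s.length : Int) - ((i : Int) + 1)
  else 0

-- B's per-index contribution counts the valid partners in the sorted suffix
lemma pvG_eq_suffix (X : Int) (s : List Int) (hs : s.Pairwise (· ≤ ·)) (i : Nat)
    (hi : i < s.length) :
    pvG X s i
      = (((s.drop (i + 1)).filter (fun h => decide (X ≤ s.getD i 0 * h))).length : Int) := by
  unfold pvG
  set w := s.getD i 0 with hw
  have hk : i + 1 ≤ s.length := hi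
  by_cases hwpos : 0 < w
  · rw [if_pos hwpos]
    have hcg := pvCountGe s (-(PySem.Int.floordiv (-X) w)) (i + 1) hs hk
    have hcongr : (s.drop (i + 1)).filter (fun h => decide (X ≤ w * h))
        = (s.drop (i + 1)).filter (fun h => decide (-(PySem.Int.floordiv (-X) w) ≤ h)) :=
      List.filter_congr (fun y _ => decide_eq_decide.mpr (pvCeil_iff X w y hwpos))
    rw [hcongr, hcg]
    omega
  · rw [if_neg hwpos]
    by_cases hwneg : w < 0
    · rw [if_pos hwneg]
      have hcl := pvCountLe s (PySem.Int.floordiv X w) (i + 1) hs hk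
      have hcongr : (s.drop (i + 1)).filter (fun h => decide (X ≤ w * h))
          = (s.drop (i + 1)).filter (fun h => decide (h ≤ PySem.Int.floordiv X w)) :=
        List.filter_congr (fun y _ => decide_eq_decide.mpr (pvFloor_iff X w y hwneg))
      rw [hcongr, hcl]
      omega
    · have hw0 : w = 0 := by omega
      rw [if_neg hwneg]
      by_cases hx : X ≤ 0
      · rw [if_pos hx]
        have : (s.drop (i + 1)).filter (fun h => decide (X ≤ w * h)) = s.drop (i + 1) := by
          rw [List.filter_eq_self]
          intro y _
          simpa [hw0] using hx
        rw [this, List.length_drop]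
        omega
      · rw [if_neg hx]
        have : (s.drop (i + 1)).filter (fun h => decide (X ≤ w * h)) = [] := by
          rw [List.filter_eq_nil_iff]
          intro y _
          simpa [hw0] using by omega
        rw [this]
        simp
 
-- the sum of suffix pair-counts is the combinations count
lemma pvPcSum (X : Int) (s : List Int) :
    ((List.range s.length).map (fun i =>
        (((s.drop (i + 1)).filter (fun h => decide (X ≤ s.getD i 0 * h))).length : Int))).sum
      = pvPc X s := by
  induction s with
  | nil => simp [pvPc, pvComb2]
  | cons a t ih =>
    have hpc : pvPc X (a :: t)
        = ((t.filter (fun h => decide (X ≤ a * h))).length : Int) + pvPc X t := by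
      simp [pvPc, pvComb2, List.filter_append, List.filter_map, Function.comp_def]
    rw [hpc, ← ih]
    rw [show (a :: t).length = t.length + 1 from rfl, List.range_succ_eq_map]
    rw [List.map_cons, List.sum_cons, List.map_map]
    rw [List.map_congr_left (fun i (_ : i ∈ List.range t.length) => by
      show ((((((a :: t).drop (Nat.succ i + 1)).filter
          (fun h => decide (X ≤ (a :: t).getD (Nat.succ i) 0 * h))).length : Nat) : Int))
        = ((((t.drop (i + 1)).filter (fun h => decide (X ≤ t.getD i 0 * h))).length : Nat) : Int)
      simp [List.drop_succ_cons, List.getD_cons_succ])]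
    simp

-- B's main loop as init + sum of per-index contributions
lemma pvFoldG (s : List Int) (X : Int) (l : List Nat) (c : Int) :
    l.foldl (fun ans i =>
      if 0 < s.getD i 0 then
        ans + ((s.length : Int)
          - max ((PySem.List.bisectLeft s (-(PySem.Int.floordiv (-X) (s.getD i 0))) : Nat) : Int)
            ((i : Int) + 1))
      else if s.getD i 0 < 0 then
        ans + max (((PySem.List.bisectRight s (PySem.Int.floordiv X (s.getD i 0)) : Nat) : Int)
          - ((i : Int) + 1)) 0
      else if X ≤ 0 then ans + ((s.length : Int) - ((i : Int) + 1))
      else ans) c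
    = c + (l.map (pvG X s)).sum := by
  induction l generalizing c with
  | nil => simp
  | cons i t ih =>
    rw [List.foldl_cons, ih, List.map_cons, List.sum_cons]
    simp only [pvG]
    split_ifs <;> ring

-- B's value is the squares count plus the pair count over the sorted repeated lengths
lemma pvAlt_eq (A : List Int) (X : Int) :
    solution_alt A X = pvSq X A + pvPc X (PySem.List.sorted (pvRep A) (fun k => k)) := by
  have hsorted : (PySem.List.sorted (pvRep A) (fun k => k)).Pairwise (· ≤ ·) :=
    PySem.List.sorted_pairwise (pvRep A) (fun k => k)
  unfold solution_alt
  simp only [PySem.Dict.items_counter, List.filter_map, List.map_map, Function.comp_def,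
    List.map_id', List.length_map]
  rw [pvFoldG]
  show pvSq X A + ((List.range (PySem.List.sorted (pvRep A) (fun k => k)).length).map
      (pvG X (PySem.List.sorted (pvRep A) (fun k => k)))).sum
    = pvSq X A + pvPc X (PySem.List.sorted (pvRep A) (fun k => k))
  congr 1
  rw [← pvPcSum X (PySem.List.sorted (pvRep A) (fun k => k))]
  exact congrArg List.sum (List.map_congr_left
    (fun i hi => pvG_eq_suffix X _ hsorted i (List.mem_range.mp hi)))

-- ===== VERDICT (by name: the statement is the Claim_ definition above) =====
theorem solution_spec : Claim_equal_solution := by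
  intro A X _
  unfold Spec_solution
  obtain ⟨hd, hnd, hmem, hans⟩ := pvLoop1_spec X A
  have hperm : (A.foldl (pvStep X) (0, PySem.Dict.empty, [])).2.2.Perm
      (PySem.List.sorted (pvRep A) (fun k => k)) := by
    refine List.Perm.trans ?_ (PySem.List.sorted_perm (pvRep A) (fun k => k) false).symm
    unfold pvRep
    rw [List.perm_ext_iff_of_nodup hnd ((PySem.Set.nodup_ofList A).filter _)]
    intro k
    rw [hmem k]
    simp only [List.mem_filter, PySem.Set.mem_ofList, decide_eq_true_eq]
    constructor
    · intro hc
      refine ⟨?_, hc⟩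
      have : 0 < A.count k := by omega
      exact List.count_pos_iff.mp this
    · exact fun h => h.2
  rw [pvAlt_eq]
  show (pvComb2 _).foldl _ _ = _
  rw [pvFoldCount, hans]
  exact congrArg (pvSq X A + ·) (pvPc_perm X hperm)
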